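-- pv_equiv track=rewrite | github.com/redd4ford/iot-information_theory | hamming-code.py | get_parity_bits_positions
-- ===== SOURCE A (Python) =====
-- def get_parity_bits_positions(number):
--     parity_bits = []
--     index = 0
--     parity_pos = 2 ** index
--     while parity_pos <= len(number):
--         parity_bits.append(parity_pos - 1)
--         index += 1
--         parity_pos = 2 ** index
--     return parity_bits
-- ===== SOURCE B (Python) =====
-- def get_parity_bits_positions(number):
--     def rec(n):
--         if n == 0:
--             return []
--         return [0] + [2 * p + 1 for p in rec(n // 2)]
--     return rec(len(number))
-- ===== Notes on version B (the rewrite author's own statement) =====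
-- stated objective: alternative
-- what changed: Replaces A's while-loop that tests successive powers 2**index against len with a divide-by-two recursion: positions for length n are 0 prepended to the positions for n//2 each mapped through p -> 2*p+1, so no power is ever computed or compared.
import Mathlib
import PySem

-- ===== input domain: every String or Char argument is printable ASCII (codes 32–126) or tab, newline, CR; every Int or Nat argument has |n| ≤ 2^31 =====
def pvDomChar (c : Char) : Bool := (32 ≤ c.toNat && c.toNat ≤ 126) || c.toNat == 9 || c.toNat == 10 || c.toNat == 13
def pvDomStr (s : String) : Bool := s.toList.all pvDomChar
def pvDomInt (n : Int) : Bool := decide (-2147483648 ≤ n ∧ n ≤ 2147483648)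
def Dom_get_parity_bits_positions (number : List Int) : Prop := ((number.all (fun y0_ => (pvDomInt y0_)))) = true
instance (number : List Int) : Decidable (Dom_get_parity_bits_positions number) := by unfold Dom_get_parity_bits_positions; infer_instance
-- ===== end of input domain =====

-- B replaces A's power-testing while-loop with a divide-by-two recursion (positions of n are 0 :: map (2p+1) of positions of n/2); objective: alternative, no speed claim.


-- ===== PORT A =====
-- A's while loop, literally: fuel bounds the iterations (2^index > len once index = len, so len+1 steps suffice)
def pvALoop (n : Nat) (fuel : Nat) (index : Nat) (acc : List Int) : List Int :=
  match fuel with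
  | 0 => acc
  | fuel + 1 =>
    if 2 ^ index ≤ n then
      pvALoop n fuel (index + 1) (acc ++ [(2 : Int) ^ index - 1])
    else acc

def get_parity_bits_positions (number : List Int) : List Int :=
  pvALoop number.length (number.length + 1) 0 []

-- ===== PORT B =====
-- B's inner rec, literally: rec 0 = [], rec n = [0] + [2*p+1 for p in rec(n//2)]
def pvBRec (n : Nat) : List Int :=
  if n = 0 then []
  else 0 :: (pvBRec (n / 2)).map (fun p => 2 * p + 1)
decreasing_by exact Nat.div_lt_self (by omega) (by omega)

def get_parity_bits_positions_alt (number : List Int) : List Int :=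
  pvBRec number.length

-- ===== PRECONDITION & SPEC =====
def Spec_get_parity_bits_positions (number : List Int) (out : List Int) : Prop := out = get_parity_bits_positions_alt number
instance (number : List Int) (out : List Int) : Decidable (Spec_get_parity_bits_positions number out) := by unfold Spec_get_parity_bits_positions; infer_instance

-- ===== CLAIM (what is proved, stated in full; the proofs are below) =====
def Claim_equal_get_parity_bits_positions : Prop := ∀ (number : List Int), Dom_get_parity_bits_positions number → Spec_get_parity_bits_positions number (get_parity_bits_positions number)

-- ===== LEMMAS AND PROOFS =====

lemma pvALoop_eq (n : Nat) : ∀ (fuel index : Nat) (acc : List Int),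
    index ≤ n.size → n.size - index ≤ fuel →
    pvALoop n fuel index acc =
      acc ++ (List.range' index (n.size - index)).map (fun k => (2 : Int) ^ k - 1) := by
  intro fuel
  induction fuel with
  | zero =>
    intro index acc hle hf
    have : n.size - index = 0 := Nat.le_zero.mp hf
    simp [pvALoop, this]
  | succ fuel ih =>
    intro index acc hle hf
    by_cases h : 2 ^ index ≤ n
    · have hlt : index < n.size := Nat.lt_size.mpr h
      have hsz : n.size - index = (n.size - (index + 1)) + 1 := by omega
      rw [pvALoop, if_pos h, ih (index + 1) _ hlt (by omega), hsz, List.range'_succ]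
      simp
    · have : n.size ≤ index := by
        by_contra hc
        exact h (Nat.lt_size.mp (Nat.lt_of_not_le hc))
      have : n.size - index = 0 := by omega
      simp [pvALoop, if_neg h, this]

lemma pvSizeHalf (n : Nat) (h : 0 < n) : (n / 2).size + 1 = n.size := by
  have key : ∀ k : Nat, n.size ≤ k + 1 ↔ (n / 2).size + 1 ≤ k + 1 := by
    intro k
    rw [Nat.size_le, Nat.add_le_add_iff_right, Nat.size_le]
    constructor
    · intro hlt
      have : n < 2 ^ k * 2 := by rw [← pow_succ]; exact hlt
      omega
    · intro hlt
      have : n < 2 ^ k * 2 := by omega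
      rw [pow_succ]; exact this
  have h1 : n.size ≤ (n / 2).size + 1 := (key ((n / 2).size)).mpr le_rfl
  have hpos : 0 < n.size := Nat.size_pos.mpr h
  have h2 : (n / 2).size + 1 ≤ n.size := by
    have := (key (n.size - 1)).mp (by omega)
    omega
  omega

lemma pvBRec_eq (n : Nat) :
    pvBRec n = (List.range n.size).map (fun k => (2 : Int) ^ k - 1) := by
  induction n using Nat.strong_induction_on with
  | _ n ih =>
    rcases Nat.eq_zero_or_pos n with h0 | hpos
    · subst h0; rw [pvBRec]; simp
    · rw [pvBRec, if_neg (by omega), ih (n / 2) (Nat.div_lt_self hpos (by omega)),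
        ← pvSizeHalf n hpos, List.range_succ_eq_map]
      simp [List.map_map, Function.comp]
      intro a _
      rw [pow_succ]
      ring

-- ===== VERDICT (by name: the statement is the Claim_ definition above) =====
theorem get_parity_bits_positions_spec : Claim_equal_get_parity_bits_positions := by
  intro number _
  unfold Spec_get_parity_bits_positions get_parity_bits_positions get_parity_bits_positions_alt
  rw [pvALoop_eq number.length (number.length + 1) 0 [] (Nat.zero_le _)
      (by
        have : number.length.size ≤ number.length + 1 :=
          Nat.size_le.mpr (Nat.lt_trans Nat.lt_two_pow_self
            (Nat.pow_lt_pow_right (by norm_num) (Nat.lt_succ_self _)))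
        omega),
    pvBRec_eq]
  simp [List.range_eq_range']
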